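-- pv_equiv track=rewrite | github.com/kon24gian/DIPLOMATIKI | testtt.py | find_insertion_points
-- ===== SOURCE A (Python) =====
-- def find_insertion_points(boustrophedon_path, obstacle_path):
--     start_x = obstacle_path[0][0][0]
--     end_x = obstacle_path[-1][0][0]
--
--     first_node, second_node = None, None
--     for node in boustrophedon_path:
--         if node[0] == start_x:
--             first_node = node
--         if node[0] == end_x:
--             second_node = node
--
--     return first_node, second_node
-- ===== SOURCE B (Python) =====
-- def find_insertion_points(boustrophedon_path, obstacle_path):
--     start_x = obstacle_path[0][0][0]
--     end_x = obstacle_path[-1][0][0]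
--     first_node = next((node for node in reversed(boustrophedon_path)
--                        if node[0] == start_x), None)
--     second_node = next((node for node in reversed(boustrophedon_path)
--                         if node[0] == end_x), None)
--     return first_node, second_node
-- ===== Notes on version B (the rewrite author's own statement) =====
-- stated objective: idiomatic
-- what changed: A's single forward loop that keeps overwriting two accumulators is replaced by two independent reverse searches (next over reversed(...)) that each stop at the first hit; last-forward-match equals first-reverse-match.
import Mathlib
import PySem

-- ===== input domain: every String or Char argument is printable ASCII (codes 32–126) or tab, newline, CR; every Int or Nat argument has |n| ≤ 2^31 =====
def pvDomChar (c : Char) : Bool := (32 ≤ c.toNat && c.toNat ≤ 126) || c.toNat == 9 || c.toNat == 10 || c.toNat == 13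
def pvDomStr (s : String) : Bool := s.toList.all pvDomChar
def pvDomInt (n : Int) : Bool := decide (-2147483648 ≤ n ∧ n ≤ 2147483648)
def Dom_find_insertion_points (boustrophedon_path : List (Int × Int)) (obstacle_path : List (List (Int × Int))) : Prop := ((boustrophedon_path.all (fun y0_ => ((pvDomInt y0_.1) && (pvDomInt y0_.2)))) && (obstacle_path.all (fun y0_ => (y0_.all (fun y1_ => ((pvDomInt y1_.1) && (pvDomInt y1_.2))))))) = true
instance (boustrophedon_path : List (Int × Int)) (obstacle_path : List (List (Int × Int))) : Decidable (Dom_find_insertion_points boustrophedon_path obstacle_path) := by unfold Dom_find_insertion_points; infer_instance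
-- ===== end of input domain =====

-- B replaces A's single forward loop over two overwritten accumulators by two
-- independent reverse searches, each stopping at its first hit (idiomatic; same cost).


-- ===== PORT A =====
-- obstacle_path[0][0][0] / obstacle_path[-1][0][0] via pyGet? (none = IndexError),
-- then the single forward for-loop updating (first_node, second_node).
def find_insertion_points (boustrophedon_path : List (Int × Int)) (obstacle_path : List (List (Int × Int))) : (Option (Int × Int)) × (Option (Int × Int)) :=
  match PySem.List.pyGet? obstacle_path 0, PySem.List.pyGet? obstacle_path (-1) with
  | some f0, some fl =>
    match PySem.List.pyGet? f0 0, PySem.List.pyGet? fl 0 with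
    | some p0, some pl =>
      let start_x := p0.1
      let end_x := pl.1
      boustrophedon_path.foldl
        (fun (acc : Option (Int × Int) × Option (Int × Int)) node =>
          (if node.1 = start_x then some node else acc.1,
           if node.1 = end_x then some node else acc.2))
        (none, none)
    | _, _ => (none, none)     -- IndexError in Python
  | _, _ => (none, none)       -- IndexError in Python

-- ===== PORT B =====
-- next((node for node in reversed(bp) if node[0] == x), None)
def pvRevSearch (x : Int) (bp : List (Int × Int)) : Option (Int × Int) :=
  bp.reverse.find? (fun node => node.1 == x)

def find_insertion_points_alt (boustrophedon_path : List (Int × Int)) (obstacle_path : List (List (Int × Int))) : (Option (Int × Int)) × (Option (Int × Int)) :=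
  match PySem.List.pyGet? obstacle_path 0 with
  | none => (none, none)       -- IndexError in Python
  | some f0 =>
    match PySem.List.pyGet? obstacle_path (-1) with
    | none => (none, none)     -- IndexError in Python
    | some fl =>
      match PySem.List.pyGet? f0 0 with
      | none => (none, none)   -- IndexError in Python
      | some p0 =>
        match PySem.List.pyGet? fl 0 with
        | none => (none, none) -- IndexError in Python
        | some pl =>
          (pvRevSearch p0.1 boustrophedon_path, pvRevSearch pl.1 boustrophedon_path)

-- ===== PRECONDITION & SPEC =====
-- Pre_ excludes exactly the inputs where both Pythons raise IndexError:
-- obstacle_path empty, or its first or last element an empty list.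
def Pre_find_insertion_points (boustrophedon_path : List (Int × Int)) (obstacle_path : List (List (Int × Int))) : Prop :=
  obstacle_path.head?.getD [] ≠ [] ∧ obstacle_path.getLast?.getD [] ≠ []
instance (boustrophedon_path : List (Int × Int)) (obstacle_path : List (List (Int × Int))) : Decidable (Pre_find_insertion_points boustrophedon_path obstacle_path) := by unfold Pre_find_insertion_points; infer_instance
def pvWitness_find_insertion_points : (List (Int × Int)) × (List (List (Int × Int))) := ([(1, 2), (3, 4)], [[(1, 0)], [(3, 0)]])

def Spec_find_insertion_points (boustrophedon_path : List (Int × Int)) (obstacle_path : List (List (Int × Int))) (out : (Option (Int × Int)) × (Option (Int × Int))) : Prop := out = find_insertion_points_alt boustrophedon_path obstacle_path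
instance (boustrophedon_path : List (Int × Int)) (obstacle_path : List (List (Int × Int))) (out : (Option (Int × Int)) × (Option (Int × Int))) : Decidable (Spec_find_insertion_points boustrophedon_path obstacle_path out) := by unfold Spec_find_insertion_points; infer_instance

-- ===== CLAIM (what is proved, stated in full; the proofs are below) =====
def Claim_equal_find_insertion_points : Prop := ∀ (boustrophedon_path : List (Int × Int)) (obstacle_path : List (List (Int × Int))), Dom_find_insertion_points boustrophedon_path obstacle_path → Pre_find_insertion_points boustrophedon_path obstacle_path → Spec_find_insertion_points boustrophedon_path obstacle_path (find_insertion_points boustrophedon_path obstacle_path)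

-- ===== LEMMAS AND PROOFS =====

-- A's paired accumulator splits into two independent folds.
theorem pvFoldPair (l : List (Int × Int)) (x y : Int) (acc : Option (Int × Int) × Option (Int × Int)) :
    l.foldl (fun (acc : Option (Int × Int) × Option (Int × Int)) node =>
        (if node.1 = x then some node else acc.1,
         if node.1 = y then some node else acc.2)) acc
    = (l.foldl (fun a node => if node.1 = x then some node else a) acc.1,
       l.foldl (fun a node => if node.1 = y then some node else a) acc.2) := by
  induction l generalizing acc with
  | nil => rfl
  | cons h t ih => simp [List.foldl, ih]

-- Last forward match equals first reverse match.
theorem pvFoldLast (l : List (Int × Int)) (x : Int) (acc : Option (Int × Int)) :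
    l.foldl (fun a node => if node.1 = x then some node else a) acc
    = (l.reverse.find? (fun node => node.1 == x)).or acc := by
  induction l generalizing acc with
  | nil => rfl
  | cons h t ih =>
    simp only [List.foldl_cons, ih, List.reverse_cons, List.find?_append]
    by_cases hx : h.1 = x <;>
      cases hfind : t.reverse.find? (fun node => node.1 == x) <;>
        simp [hx, Option.or]

-- ===== VERDICT (by name: the statement is the Claim_ definition above) =====
theorem find_insertion_points_spec : Claim_equal_find_insertion_points := by
  intro bp op _ _
  unfold Spec_find_insertion_points find_insertion_points find_insertion_points_alt
  cases h0 : PySem.List.pyGet? op 0 <;> cases h1 : PySem.List.pyGet? op (-1) <;> try rfl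
  rename_i f0 fl
  cases h2 : PySem.List.pyGet? f0 0 <;> cases h3 : PySem.List.pyGet? fl 0 <;>
    simp only [h2, h3, pvFoldPair, pvFoldLast, Option.or_none, pvRevSearch]
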